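-- pv_equiv track=rewrite | github.com/awsdevs/codebert-repo-chunker | codebert-repo-chunker/src/chunkers/build/docker_chunker.py | _detect_patterns
-- ===== SOURCE A (Python) =====
-- from typing import List, Dict, Any, Optional, Tuple, Set
--
-- def _detect_patterns(instructions: List[Dict[str, Any]]) -> Dict[str, bool]:
--     """Detect common Dockerfile patterns"""
--     patterns = {
--         'uses_apt_get': False,
--         'uses_apk': False,
--         'uses_yum': False,
--         'uses_pip': False,
--         'uses_npm': False,
--         'uses_yarn': False,
--         'uses_maven': False,
--         'uses_gradle': False,
--         'layer_caching_optimized': False,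
--         'multi_stage_build': False,
--         'distroless_final': False,
--         'non_root_user': False,
--         'healthcheck_defined': False
--     }
--
--     for inst in instructions:
--         if inst['instruction'] == 'RUN':
--             args = inst['arguments'].lower()
--
--             # Package managers
--             if 'apt-get' in args or 'apt ' in args:
--                 patterns['uses_apt_get'] = True
--             if 'apk ' in args:
--                 patterns['uses_apk'] = True
--             if 'yum ' in args:
--                 patterns['uses_yum'] = True
--
--             # Language package managers
--             if 'pip install' in args:
--                 patterns['uses_pip'] = True
--             if 'npm install' in args or 'npm ci' in args:
--                 patterns['uses_npm'] = True
--             if 'yarn install' in args: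
--                 patterns['uses_yarn'] = True
--             if 'mvn ' in args:
--                 patterns['uses_maven'] = True
--             if 'gradle ' in args:
--                 patterns['uses_gradle'] = True
--
--         elif inst['instruction'] == 'USER':
--             if inst['arguments'] != 'root':
--                 patterns['non_root_user'] = True
--
--         elif inst['instruction'] == 'HEALTHCHECK':
--             patterns['healthcheck_defined'] = True
--
--     # Check for multi-stage patterns
--     from_instructions = [i for i in instructions if i['instruction'] == 'FROM']
--     if len(from_instructions) > 1:
--         patterns['multi_stage_build'] = True
--
--         # Check for distroless final stage
--         last_from = from_instructions[-1]['arguments'].lower()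
--         if 'distroless' in last_from or 'scratch' in last_from:
--             patterns['distroless_final'] = True
--
--     # Check for layer caching optimization
--     # Dependencies should be copied before application code
--     copy_instructions = [i for i in instructions if i['instruction'] == 'COPY']
--     if len(copy_instructions) >= 2:
--         # Simple heuristic: package files copied before source
--         for i, copy_inst in enumerate(copy_instructions[:-1]):
--             if any(pkg in copy_inst['arguments']
--                   for pkg in ['package.json', 'requirements.txt', 'pom.xml', 'build.gradle']):
--                 patterns['layer_caching_optimized'] = True
--                 break
--
--     return patterns
-- ===== SOURCE B (Python) =====
-- # B: declarative decomposition — no event loop with dispatch and no mutable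
-- # flags dict: three comprehensions project the RUN arguments and the FROM/COPY
-- # instructions, and each of the 13 flags is an independent boolean expression
-- # in a single dict literal.
--
-- _PKG_FILES = ('package.json', 'requirements.txt', 'pom.xml', 'build.gradle')
--
--
-- def _detect_patterns(instructions):
--     runs = [i['arguments'].lower() for i in instructions if i['instruction'] == 'RUN']
--     froms = [i for i in instructions if i['instruction'] == 'FROM']
--     copies = [i for i in instructions if i['instruction'] == 'COPY']
--     multi = len(froms) > 1
--     last_from = froms[-1]['arguments'].lower() if multi else ''
--     return {
--         'uses_apt_get': any('apt-get' in a or 'apt ' in a for a in runs),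
--         'uses_apk': any('apk ' in a for a in runs),
--         'uses_yum': any('yum ' in a for a in runs),
--         'uses_pip': any('pip install' in a for a in runs),
--         'uses_npm': any('npm install' in a or 'npm ci' in a for a in runs),
--         'uses_yarn': any('yarn install' in a for a in runs),
--         'uses_maven': any('mvn ' in a for a in runs),
--         'uses_gradle': any('gradle ' in a for a in runs),
--         'layer_caching_optimized': len(copies) >= 2 and any(
--             pkg in c['arguments'] for c in copies[:-1] for pkg in _PKG_FILES),
--         'multi_stage_build': multi,
--         'distroless_final': multi and ('distroless' in last_from or 'scratch' in last_from),
--         'non_root_user': any(i['instruction'] == 'USER' and i['arguments'] != 'root'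
--                              for i in instructions),
--         'healthcheck_defined': any(i['instruction'] == 'HEALTHCHECK' for i in instructions),
--     }
-- ===== Notes on version B (the rewrite author's own statement) =====
-- stated objective: simpler
-- what changed: A's imperative event loop that dispatches on instruction type and mutates a flags dict (plus two later filter passes and a break-scan) is replaced by a fully declarative decomposition: three comprehensions project the RUN arguments and the FROM/COPY instructions, and every one of the 13 flags is computed as its own independent boolean any(...)/length expression in one dict literal, with no loop-carried state at all.
import Mathlib
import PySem

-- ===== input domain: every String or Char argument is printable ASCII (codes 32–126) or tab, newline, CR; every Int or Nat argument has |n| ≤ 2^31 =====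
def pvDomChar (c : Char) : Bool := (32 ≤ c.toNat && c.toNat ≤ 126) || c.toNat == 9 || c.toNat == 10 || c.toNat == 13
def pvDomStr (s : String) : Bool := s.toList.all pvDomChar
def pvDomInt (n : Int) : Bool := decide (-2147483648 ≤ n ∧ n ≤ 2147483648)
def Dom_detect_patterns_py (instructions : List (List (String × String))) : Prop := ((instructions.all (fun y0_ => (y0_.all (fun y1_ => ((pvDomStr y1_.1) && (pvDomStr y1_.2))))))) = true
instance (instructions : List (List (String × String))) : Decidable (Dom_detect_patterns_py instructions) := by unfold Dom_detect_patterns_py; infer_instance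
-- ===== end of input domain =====

-- B replaces A's imperative event loop over a mutable flags dict (plus two filter
-- passes and a break-scan) with a declarative decomposition: three comprehensions
-- (RUN arguments, FROM instructions, COPY instructions) and thirteen independent
-- boolean expressions, one per flag; equivalence is proved for the RETURN value on
-- all inputs where A returns (Pre_).

-- ===== PORT A =====
def pvArgA (inst : List (String × String)) : String := (inst.lookup "arguments").getD ""

def pvStepA (pats : PySem.Dict String Bool) (inst : List (String × String)) : PySem.Dict String Bool :=
  if inst.lookup "instruction" == some "RUN" then
    let args := PySem.Str.lower (pvArgA inst)
    let p1 := if PySem.Str.isIn "apt-get" args || PySem.Str.isIn "apt " args then pats.insert "uses_apt_get" true else pats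
    let p2 := if PySem.Str.isIn "apk " args then p1.insert "uses_apk" true else p1
    let p3 := if PySem.Str.isIn "yum " args then p2.insert "uses_yum" true else p2
    let p4 := if PySem.Str.isIn "pip install" args then p3.insert "uses_pip" true else p3
    let p5 := if PySem.Str.isIn "npm install" args || PySem.Str.isIn "npm ci" args then p4.insert "uses_npm" true else p4
    let p6 := if PySem.Str.isIn "yarn install" args then p5.insert "uses_yarn" true else p5
    let p7 := if PySem.Str.isIn "mvn " args then p6.insert "uses_maven" true else p6
    let p8 := if PySem.Str.isIn "gradle " args then p7.insert "uses_gradle" true else p7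
    p8
  else if inst.lookup "instruction" == some "USER" then
    if pvArgA inst ≠ "root" then pats.insert "non_root_user" true else pats
  else if inst.lookup "instruction" == some "HEALTHCHECK" then
    pats.insert "healthcheck_defined" true
  else pats

def pvPkgFilesA : List String := ["package.json", "requirements.txt", "pom.xml", "build.gradle"]

-- the 'for i, copy_inst in enumerate(...): if any(...): ...; break' scan
def pvScanCopyA : List (List (String × String)) → Bool
  | [] => false
  | c :: rest =>
      if pvPkgFilesA.any (fun pkg => PySem.Str.isIn pkg (pvArgA c)) then true
      else pvScanCopyA rest

def detect_patterns_py (instructions : List (List (String × String))) : List (String × Bool) :=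
  let pats0 : PySem.Dict String Bool := PySem.Dict.ofList
    [("uses_apt_get", false), ("uses_apk", false), ("uses_yum", false), ("uses_pip", false),
     ("uses_npm", false), ("uses_yarn", false), ("uses_maven", false), ("uses_gradle", false),
     ("layer_caching_optimized", false), ("multi_stage_build", false), ("distroless_final", false),
     ("non_root_user", false), ("healthcheck_defined", false)]
  let pats1 := instructions.foldl pvStepA pats0
  let from_instructions := instructions.filter (fun i => i.lookup "instruction" == some "FROM")
  let pats2 :=
    if from_instructions.length > 1 then
      let p := pats1.insert "multi_stage_build" true
      let last_from := PySem.Str.lower (pvArgA ((PySem.List.pyGet? from_instructions (-1)).getD []))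
      if PySem.Str.isIn "distroless" last_from || PySem.Str.isIn "scratch" last_from then
        p.insert "distroless_final" true
      else p
    else pats1
  let copy_instructions := instructions.filter (fun i => i.lookup "instruction" == some "COPY")
  let pats3 :=
    if copy_instructions.length ≥ 2 then
      if pvScanCopyA (PySem.List.slice copy_instructions none (some (-1))) then
        pats2.insert "layer_caching_optimized" true
      else pats2
    else pats2
  pats3.items

-- ===== PORT B =====
def pvPkgFilesB : List String := ["package.json", "requirements.txt", "pom.xml", "build.gradle"]

def pvArgB (inst : List (String × String)) : String := (inst.lookup "arguments").getD ""

def detect_patterns_py_alt (instructions : List (List (String × String))) : List (String × Bool) :=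
  let runs := instructions.filterMap (fun i =>
    if i.lookup "instruction" == some "RUN" then some (PySem.Str.lower (pvArgB i)) else none)
  let froms := instructions.filter (fun i => i.lookup "instruction" == some "FROM")
  let copies := instructions.filter (fun i => i.lookup "instruction" == some "COPY")
  let multi := decide (froms.length > 1)
  let last_from := if multi then PySem.Str.lower (pvArgB ((PySem.List.pyGet? froms (-1)).getD [])) else ""
  [("uses_apt_get", runs.any fun a => PySem.Str.isIn "apt-get" a || PySem.Str.isIn "apt " a),
   ("uses_apk", runs.any fun a => PySem.Str.isIn "apk " a),
   ("uses_yum", runs.any fun a => PySem.Str.isIn "yum " a),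
   ("uses_pip", runs.any fun a => PySem.Str.isIn "pip install" a),
   ("uses_npm", runs.any fun a => PySem.Str.isIn "npm install" a || PySem.Str.isIn "npm ci" a),
   ("uses_yarn", runs.any fun a => PySem.Str.isIn "yarn install" a),
   ("uses_maven", runs.any fun a => PySem.Str.isIn "mvn " a),
   ("uses_gradle", runs.any fun a => PySem.Str.isIn "gradle " a),
   ("layer_caching_optimized", decide (copies.length ≥ 2) &&
      (PySem.List.slice copies none (some (-1))).any (fun c =>
        pvPkgFilesB.any fun pkg => PySem.Str.isIn pkg (pvArgB c))),
   ("multi_stage_build", multi),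
   ("distroless_final", multi && (PySem.Str.isIn "distroless" last_from || PySem.Str.isIn "scratch" last_from)),
   ("non_root_user", instructions.any fun i =>
      (i.lookup "instruction" == some "USER") && (pvArgB i != "root")),
   ("healthcheck_defined", instructions.any fun i => i.lookup "instruction" == some "HEALTHCHECK")]

-- ===== PRECONDITION & SPEC =====
-- Pre_ excludes (a) instructions missing the 'instruction' key, RUN/USER instructions
-- missing 'arguments', a last FROM of a multi-stage build missing 'arguments', and a
-- COPY among copies[:-1] missing 'arguments' that A's break-scan reaches — on all of
-- those A raises KeyError; and (b) association lists with a repeated key, which no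
-- Python dict can represent (A and B both read the dict, so the corner is unreachable
-- from Python).
def Pre_detect_patterns_py (instructions : List (List (String × String))) : Prop :=
  (∀ i ∈ instructions, (i.map Prod.fst).Nodup ∧ (i.lookup "instruction").isSome = true ∧
      ((i.lookup "instruction" = some "RUN" ∨ i.lookup "instruction" = some "USER") →
        (i.lookup "arguments").isSome = true)) ∧
  ((instructions.filter (fun i => i.lookup "instruction" == some "FROM")).length > 1 →
    ((((instructions.filter (fun i => i.lookup "instruction" == some "FROM")).getLast?.getD []).lookup
        "arguments").isSome = true)) ∧
  ((instructions.filter (fun i => i.lookup "instruction" == some "COPY")).length ≥ 2 →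
    ∀ j < ((instructions.filter (fun i => i.lookup "instruction" == some "COPY")).dropLast).length,
      (((instructions.filter (fun i => i.lookup "instruction" == some "COPY")).dropLast.getD j []).lookup
          "arguments") = none →
      ∃ j' < j, pvPkgFilesA.any (fun pkg => PySem.Str.isIn pkg
        (pvArgA ((instructions.filter (fun i => i.lookup "instruction" == some "COPY")).dropLast.getD j' []))) = true)
instance (instructions : List (List (String × String))) : Decidable (Pre_detect_patterns_py instructions) := by
  unfold Pre_detect_patterns_py; infer_instance

def pvWitness_detect_patterns_py : (List (List (String × String))) :=
  [[("instruction", "FROM"), ("arguments", "python:3.11")],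
   [("instruction", "COPY"), ("arguments", "requirements.txt .")],
   [("instruction", "RUN"), ("arguments", "pip install -r requirements.txt")],
   [("instruction", "COPY"), ("arguments", ". .")],
   [("instruction", "USER"), ("arguments", "app")]]

def Spec_detect_patterns_py (instructions : List (List (String × String))) (out : List (String × Bool)) : Prop := out = detect_patterns_py_alt instructions
instance (instructions : List (List (String × String))) (out : List (String × Bool)) : Decidable (Spec_detect_patterns_py instructions out) := by unfold Spec_detect_patterns_py; infer_instance

-- ===== CLAIM (what is proved, stated in full; the proofs are below) =====
def Claim_equal_detect_patterns_py : Prop := ∀ (instructions : List (List (String × String))), Dom_detect_patterns_py instructions → Pre_detect_patterns_py instructions → Spec_detect_patterns_py instructions (detect_patterns_py instructions)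

-- ===== LEMMAS AND PROOFS =====

def pvMkD (b1 b2 b3 b4 b5 b6 b7 b8 b9 b10 b11 b12 b13 : Bool) : PySem.Dict String Bool :=
  PySem.Dict.mk
    [("uses_apt_get", b1), ("uses_apk", b2), ("uses_yum", b3), ("uses_pip", b4),
     ("uses_npm", b5), ("uses_yarn", b6), ("uses_maven", b7), ("uses_gradle", b8),
     ("layer_caching_optimized", b9), ("multi_stage_build", b10), ("distroless_final", b11),
     ("non_root_user", b12), ("healthcheck_defined", b13)]

def pvRunArgs (i : List (String × String)) : String := PySem.Str.lower (pvArgA i)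
def pvIsRun (i : List (String × String)) : Bool := i.lookup "instruction" == some "RUN"
def pvHitApt (i : List (String × String)) : Bool :=
  pvIsRun i && (PySem.Str.isIn "apt-get" (pvRunArgs i) || PySem.Str.isIn "apt " (pvRunArgs i))
def pvHitApk (i : List (String × String)) : Bool := pvIsRun i && PySem.Str.isIn "apk " (pvRunArgs i)
def pvHitYum (i : List (String × String)) : Bool := pvIsRun i && PySem.Str.isIn "yum " (pvRunArgs i)
def pvHitPip (i : List (String × String)) : Bool := pvIsRun i && PySem.Str.isIn "pip install" (pvRunArgs i)
def pvHitNpm (i : List (String × String)) : Bool :=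
  pvIsRun i && (PySem.Str.isIn "npm install" (pvRunArgs i) || PySem.Str.isIn "npm ci" (pvRunArgs i))
def pvHitYarn (i : List (String × String)) : Bool := pvIsRun i && PySem.Str.isIn "yarn install" (pvRunArgs i)
def pvHitMvn (i : List (String × String)) : Bool := pvIsRun i && PySem.Str.isIn "mvn " (pvRunArgs i)
def pvHitGradle (i : List (String × String)) : Bool := pvIsRun i && PySem.Str.isIn "gradle " (pvRunArgs i)
def pvHitUser (i : List (String × String)) : Bool :=
  (i.lookup "instruction" == some "USER") && decide (pvArgA i ≠ "root")
def pvHitHealth (i : List (String × String)) : Bool := i.lookup "instruction" == some "HEALTHCHECK"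

theorem pvInsU_aptget (b1 b2 b3 b4 b5 b6 b7 b8 b9 b10 b11 b12 b13 : Bool) :
  (pvMkD b1 b2 b3 b4 b5 b6 b7 b8 b9 b10 b11 b12 b13).insert "uses_apt_get" true = pvMkD true b2 b3 b4 b5 b6 b7 b8 b9 b10 b11 b12 b13 := rfl
theorem pvIns_aptget (c : Prop) [Decidable c] (b1 b2 b3 b4 b5 b6 b7 b8 b9 b10 b11 b12 b13 : Bool) :
  (if c then (pvMkD b1 b2 b3 b4 b5 b6 b7 b8 b9 b10 b11 b12 b13).insert "uses_apt_get" true else pvMkD b1 b2 b3 b4 b5 b6 b7 b8 b9 b10 b11 b12 b13) = pvMkD (b1 || decide c) b2 b3 b4 b5 b6 b7 b8 b9 b10 b11 b12 b13 := by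
  by_cases h : c <;> simp [h, pvInsU_aptget]

theorem pvInsU_apk (b1 b2 b3 b4 b5 b6 b7 b8 b9 b10 b11 b12 b13 : Bool) :
  (pvMkD b1 b2 b3 b4 b5 b6 b7 b8 b9 b10 b11 b12 b13).insert "uses_apk" true = pvMkD b1 true b3 b4 b5 b6 b7 b8 b9 b10 b11 b12 b13 := rfl
theorem pvIns_apk (c : Prop) [Decidable c] (b1 b2 b3 b4 b5 b6 b7 b8 b9 b10 b11 b12 b13 : Bool) :
  (if c then (pvMkD b1 b2 b3 b4 b5 b6 b7 b8 b9 b10 b11 b12 b13).insert "uses_apk" true else pvMkD b1 b2 b3 b4 b5 b6 b7 b8 b9 b10 b11 b12 b13) = pvMkD b1 (b2 || decide c) b3 b4 b5 b6 b7 b8 b9 b10 b11 b12 b13 := by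
  by_cases h : c <;> simp [h, pvInsU_apk]

theorem pvInsU_yum (b1 b2 b3 b4 b5 b6 b7 b8 b9 b10 b11 b12 b13 : Bool) :
  (pvMkD b1 b2 b3 b4 b5 b6 b7 b8 b9 b10 b11 b12 b13).insert "uses_yum" true = pvMkD b1 b2 true b4 b5 b6 b7 b8 b9 b10 b11 b12 b13 := rfl
theorem pvIns_yum (c : Prop) [Decidable c] (b1 b2 b3 b4 b5 b6 b7 b8 b9 b10 b11 b12 b13 : Bool) :
  (if c then (pvMkD b1 b2 b3 b4 b5 b6 b7 b8 b9 b10 b11 b12 b13).insert "uses_yum" true else pvMkD b1 b2 b3 b4 b5 b6 b7 b8 b9 b10 b11 b12 b13) = pvMkD b1 b2 (b3 || decide c) b4 b5 b6 b7 b8 b9 b10 b11 b12 b13 := by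
  by_cases h : c <;> simp [h, pvInsU_yum]

theorem pvInsU_pip (b1 b2 b3 b4 b5 b6 b7 b8 b9 b10 b11 b12 b13 : Bool) :
  (pvMkD b1 b2 b3 b4 b5 b6 b7 b8 b9 b10 b11 b12 b13).insert "uses_pip" true = pvMkD b1 b2 b3 true b5 b6 b7 b8 b9 b10 b11 b12 b13 := rfl
theorem pvIns_pip (c : Prop) [Decidable c] (b1 b2 b3 b4 b5 b6 b7 b8 b9 b10 b11 b12 b13 : Bool) :
  (if c then (pvMkD b1 b2 b3 b4 b5 b6 b7 b8 b9 b10 b11 b12 b13).insert "uses_pip" true else pvMkD b1 b2 b3 b4 b5 b6 b7 b8 b9 b10 b11 b12 b13) = pvMkD b1 b2 b3 (b4 || decide c) b5 b6 b7 b8 b9 b10 b11 b12 b13 := by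
  by_cases h : c <;> simp [h, pvInsU_pip]

theorem pvInsU_npm (b1 b2 b3 b4 b5 b6 b7 b8 b9 b10 b11 b12 b13 : Bool) :
  (pvMkD b1 b2 b3 b4 b5 b6 b7 b8 b9 b10 b11 b12 b13).insert "uses_npm" true = pvMkD b1 b2 b3 b4 true b6 b7 b8 b9 b10 b11 b12 b13 := rfl
theorem pvIns_npm (c : Prop) [Decidable c] (b1 b2 b3 b4 b5 b6 b7 b8 b9 b10 b11 b12 b13 : Bool) :
  (if c then (pvMkD b1 b2 b3 b4 b5 b6 b7 b8 b9 b10 b11 b12 b13).insert "uses_npm" true else pvMkD b1 b2 b3 b4 b5 b6 b7 b8 b9 b10 b11 b12 b13) = pvMkD b1 b2 b3 b4 (b5 || decide c) b6 b7 b8 b9 b10 b11 b12 b13 := by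
  by_cases h : c <;> simp [h, pvInsU_npm]

theorem pvInsU_yarn (b1 b2 b3 b4 b5 b6 b7 b8 b9 b10 b11 b12 b13 : Bool) :
  (pvMkD b1 b2 b3 b4 b5 b6 b7 b8 b9 b10 b11 b12 b13).insert "uses_yarn" true = pvMkD b1 b2 b3 b4 b5 true b7 b8 b9 b10 b11 b12 b13 := rfl
theorem pvIns_yarn (c : Prop) [Decidable c] (b1 b2 b3 b4 b5 b6 b7 b8 b9 b10 b11 b12 b13 : Bool) :
  (if c then (pvMkD b1 b2 b3 b4 b5 b6 b7 b8 b9 b10 b11 b12 b13).insert "uses_yarn" true else pvMkD b1 b2 b3 b4 b5 b6 b7 b8 b9 b10 b11 b12 b13) = pvMkD b1 b2 b3 b4 b5 (b6 || decide c) b7 b8 b9 b10 b11 b12 b13 := by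
  by_cases h : c <;> simp [h, pvInsU_yarn]

theorem pvInsU_maven (b1 b2 b3 b4 b5 b6 b7 b8 b9 b10 b11 b12 b13 : Bool) :
  (pvMkD b1 b2 b3 b4 b5 b6 b7 b8 b9 b10 b11 b12 b13).insert "uses_maven" true = pvMkD b1 b2 b3 b4 b5 b6 true b8 b9 b10 b11 b12 b13 := rfl
theorem pvIns_maven (c : Prop) [Decidable c] (b1 b2 b3 b4 b5 b6 b7 b8 b9 b10 b11 b12 b13 : Bool) :
  (if c then (pvMkD b1 b2 b3 b4 b5 b6 b7 b8 b9 b10 b11 b12 b13).insert "uses_maven" true else pvMkD b1 b2 b3 b4 b5 b6 b7 b8 b9 b10 b11 b12 b13) = pvMkD b1 b2 b3 b4 b5 b6 (b7 || decide c) b8 b9 b10 b11 b12 b13 := by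
  by_cases h : c <;> simp [h, pvInsU_maven]

theorem pvInsU_gradle (b1 b2 b3 b4 b5 b6 b7 b8 b9 b10 b11 b12 b13 : Bool) :
  (pvMkD b1 b2 b3 b4 b5 b6 b7 b8 b9 b10 b11 b12 b13).insert "uses_gradle" true = pvMkD b1 b2 b3 b4 b5 b6 b7 true b9 b10 b11 b12 b13 := rfl
theorem pvIns_gradle (c : Prop) [Decidable c] (b1 b2 b3 b4 b5 b6 b7 b8 b9 b10 b11 b12 b13 : Bool) :
  (if c then (pvMkD b1 b2 b3 b4 b5 b6 b7 b8 b9 b10 b11 b12 b13).insert "uses_gradle" true else pvMkD b1 b2 b3 b4 b5 b6 b7 b8 b9 b10 b11 b12 b13) = pvMkD b1 b2 b3 b4 b5 b6 b7 (b8 || decide c) b9 b10 b11 b12 b13 := by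
  by_cases h : c <;> simp [h, pvInsU_gradle]

theorem pvInsU_layercachingoptimized (b1 b2 b3 b4 b5 b6 b7 b8 b9 b10 b11 b12 b13 : Bool) :
  (pvMkD b1 b2 b3 b4 b5 b6 b7 b8 b9 b10 b11 b12 b13).insert "layer_caching_optimized" true = pvMkD b1 b2 b3 b4 b5 b6 b7 b8 true b10 b11 b12 b13 := rfl
theorem pvInsU_multistagebuild (b1 b2 b3 b4 b5 b6 b7 b8 b9 b10 b11 b12 b13 : Bool) :
  (pvMkD b1 b2 b3 b4 b5 b6 b7 b8 b9 b10 b11 b12 b13).insert "multi_stage_build" true = pvMkD b1 b2 b3 b4 b5 b6 b7 b8 b9 true b11 b12 b13 := rfl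
theorem pvInsU_distrolessfinal (b1 b2 b3 b4 b5 b6 b7 b8 b9 b10 b11 b12 b13 : Bool) :
  (pvMkD b1 b2 b3 b4 b5 b6 b7 b8 b9 b10 b11 b12 b13).insert "distroless_final" true = pvMkD b1 b2 b3 b4 b5 b6 b7 b8 b9 b10 true b12 b13 := rfl
theorem pvInsU_nonrootuser (b1 b2 b3 b4 b5 b6 b7 b8 b9 b10 b11 b12 b13 : Bool) :
  (pvMkD b1 b2 b3 b4 b5 b6 b7 b8 b9 b10 b11 b12 b13).insert "non_root_user" true = pvMkD b1 b2 b3 b4 b5 b6 b7 b8 b9 b10 b11 true b13 := rfl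
theorem pvIns_nonrootuser (c : Prop) [Decidable c] (b1 b2 b3 b4 b5 b6 b7 b8 b9 b10 b11 b12 b13 : Bool) :
  (if c then (pvMkD b1 b2 b3 b4 b5 b6 b7 b8 b9 b10 b11 b12 b13).insert "non_root_user" true else pvMkD b1 b2 b3 b4 b5 b6 b7 b8 b9 b10 b11 b12 b13) = pvMkD b1 b2 b3 b4 b5 b6 b7 b8 b9 b10 b11 (b12 || decide c) b13 := by
  by_cases h : c <;> simp [h, pvInsU_nonrootuser]

theorem pvInsU_healthcheckdefined (b1 b2 b3 b4 b5 b6 b7 b8 b9 b10 b11 b12 b13 : Bool) :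
  (pvMkD b1 b2 b3 b4 b5 b6 b7 b8 b9 b10 b11 b12 b13).insert "healthcheck_defined" true = pvMkD b1 b2 b3 b4 b5 b6 b7 b8 b9 b10 b11 b12 true := rfl

theorem pvStepA_mkD (b1 b2 b3 b4 b5 b6 b7 b8 b9 b10 b11 b12 b13 : Bool) (x : List (String × String)) :
  pvStepA (pvMkD b1 b2 b3 b4 b5 b6 b7 b8 b9 b10 b11 b12 b13) x =
    pvMkD (b1 || pvHitApt x) (b2 || pvHitApk x) (b3 || pvHitYum x) (b4 || pvHitPip x)
      (b5 || pvHitNpm x) (b6 || pvHitYarn x) (b7 || pvHitMvn x) (b8 || pvHitGradle x)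
      b9 b10 b11 (b12 || pvHitUser x) (b13 || pvHitHealth x) := by
  unfold pvStepA
  by_cases hR : (x.lookup "instruction" == some "RUN") = true
  · have h' : x.lookup "instruction" = some "RUN" := by simpa using hR
    simp only [hR, if_true]
    simp only [pvIns_aptget, pvIns_apk, pvIns_yum, pvIns_pip, pvIns_npm, pvIns_yarn,
      pvIns_maven, pvIns_gradle]
    simp [pvHitApt, pvHitApk, pvHitYum, pvHitPip, pvHitNpm, pvHitYarn, pvHitMvn, pvHitGradle,
      pvHitUser, pvHitHealth, pvIsRun, pvRunArgs, h']
  · by_cases hU : (x.lookup "instruction" == some "USER") = true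
    · have h' : x.lookup "instruction" = some "USER" := by simpa using hU
      simp only [hR, hU, if_true, if_false, Bool.false_eq_true, pvIns_nonrootuser]
      simp [pvHitApt, pvHitApk, pvHitYum, pvHitPip, pvHitNpm, pvHitYarn, pvHitMvn, pvHitGradle,
        pvHitUser, pvHitHealth, pvIsRun, h']
    · by_cases hH : (x.lookup "instruction" == some "HEALTHCHECK") = true
      · have h' : x.lookup "instruction" = some "HEALTHCHECK" := by simpa using hH
        simp only [hR, hU, hH, if_true, if_false, Bool.false_eq_true, pvInsU_healthcheckdefined]
        simp [pvHitApt, pvHitApk, pvHitYum, pvHitPip, pvHitNpm, pvHitYarn, pvHitMvn, pvHitGradle,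
          pvHitUser, pvHitHealth, pvIsRun, h']
      · simp [hR, hU, hH, pvHitApt, pvHitApk, pvHitYum, pvHitPip, pvHitNpm, pvHitYarn, pvHitMvn,
          pvHitGradle, pvHitUser, pvHitHealth, pvIsRun, Bool.false_eq_true]

theorem pvFoldA (l : List (List (String × String))) (b1 b2 b3 b4 b5 b6 b7 b8 b9 b10 b11 b12 b13 : Bool) :
  l.foldl pvStepA (pvMkD b1 b2 b3 b4 b5 b6 b7 b8 b9 b10 b11 b12 b13) =
    pvMkD (b1 || l.any pvHitApt) (b2 || l.any pvHitApk) (b3 || l.any pvHitYum)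
      (b4 || l.any pvHitPip) (b5 || l.any pvHitNpm) (b6 || l.any pvHitYarn)
      (b7 || l.any pvHitMvn) (b8 || l.any pvHitGradle) b9 b10 b11
      (b12 || l.any pvHitUser) (b13 || l.any pvHitHealth) := by
  induction l generalizing b1 b2 b3 b4 b5 b6 b7 b8 b9 b10 b11 b12 b13 with
  | nil => simp
  | cons x xs ih =>
      rw [List.foldl_cons, pvStepA_mkD, ih]
      simp [List.any_cons, Bool.or_assoc]

theorem pvScanCopyA_eq (l : List (List (String × String))) :
    pvScanCopyA l = l.any (fun c => pvPkgFilesA.any (fun pkg => PySem.Str.isIn pkg (pvArgA c))) := by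
  induction l with
  | nil => simp [pvScanCopyA]
  | cons c rest ih =>
      unfold pvScanCopyA
      by_cases h : (pvPkgFilesA.any (fun pkg => PySem.Str.isIn pkg (pvArgA c))) = true
      · rw [if_pos h, List.any_cons, h, Bool.true_or]
      · have h' : (pvPkgFilesA.any (fun pkg => PySem.Str.isIn pkg (pvArgA c))) = false :=
          Bool.eq_false_iff.mpr h
        rw [if_neg h, ih, List.any_cons, h', Bool.false_or]

theorem pvInit :
  (PySem.Dict.ofList
    [("uses_apt_get", false), ("uses_apk", false), ("uses_yum", false), ("uses_pip", false),
     ("uses_npm", false), ("uses_yarn", false), ("uses_maven", false), ("uses_gradle", false),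
     ("layer_caching_optimized", false), ("multi_stage_build", false), ("distroless_final", false),
     ("non_root_user", false), ("healthcheck_defined", false)] : PySem.Dict String Bool) =
    pvMkD false false false false false false false false false false false false false := rfl

theorem pvMkD_items (b1 b2 b3 b4 b5 b6 b7 b8 b9 b10 b11 b12 b13 : Bool) :
  (pvMkD b1 b2 b3 b4 b5 b6 b7 b8 b9 b10 b11 b12 b13).items =
    [("uses_apt_get", b1), ("uses_apk", b2), ("uses_yum", b3), ("uses_pip", b4),
     ("uses_npm", b5), ("uses_yarn", b6), ("uses_maven", b7), ("uses_gradle", b8),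
     ("layer_caching_optimized", b9), ("multi_stage_build", b10), ("distroless_final", b11),
     ("non_root_user", b12), ("healthcheck_defined", b13)] := rfl

-- B's run-argument comprehension folded back into a scan of the instruction list
theorem pvRuns_any (l : List (List (String × String))) (q : String → Bool) :
    (l.filterMap (fun i =>
      if i.lookup "instruction" == some "RUN" then some (PySem.Str.lower (pvArgB i)) else none)).any q
    = l.any (fun i => pvIsRun i && q (pvRunArgs i)) := by
  induction l with
  | nil => rfl
  | cons x xs ih =>
      by_cases h : (x.lookup "instruction" == some "RUN") = true
      · have h' : x.lookup "instruction" = some "RUN" := by simpa using h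
        have hm : ((x :: xs).filterMap (fun i =>
            if i.lookup "instruction" == some "RUN" then some (PySem.Str.lower (pvArgB i)) else none))
            = PySem.Str.lower (pvArgB x) :: (xs.filterMap (fun i =>
                if i.lookup "instruction" == some "RUN" then some (PySem.Str.lower (pvArgB i)) else none)) := by
          simp [h']
        rw [hm, List.any_cons, List.any_cons, ih]
        have hx : pvIsRun x = true := h
        simp [hx, pvRunArgs, pvArgA, pvArgB]
      · have h' : ¬ x.lookup "instruction" = some "RUN" := by simpa using h
        have hm : ((x :: xs).filterMap (fun i =>
            if i.lookup "instruction" == some "RUN" then some (PySem.Str.lower (pvArgB i)) else none))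
            = (xs.filterMap (fun i =>
                if i.lookup "instruction" == some "RUN" then some (PySem.Str.lower (pvArgB i)) else none)) := by
          simp [h']
        rw [hm, List.any_cons, ih]
        have hx : pvIsRun x = false := by simpa [pvIsRun] using h
        simp [hx]

theorem pvBeqDecide (a b : String) : (a == b) = decide (a = b) := by
  by_cases h : a = b <;> simp [h]

theorem pvAnyUser (ins : List (List (String × String))) :
    ins.any pvHitUser
      = ins.any (fun i => (i.lookup "instruction" == some "USER") && (pvArgB i != "root")) := by
  induction ins with
  | nil => rfl
  | cons x xs ih =>
      rw [List.any_cons, List.any_cons, ih]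
      simp [pvHitUser, pvArgA, pvArgB, bne, pvBeqDecide]

set_option maxHeartbeats 1000000 in
theorem pvMain (ins : List (List (String × String))) :
    detect_patterns_py ins = detect_patterns_py_alt ins := by
  unfold detect_patterns_py detect_patterns_py_alt
  simp only [pvInit, pvFoldA, Bool.false_or, pvScanCopyA_eq, pvRuns_any, pvAnyUser,
    decide_eq_true_eq]
  split_ifs <;>
  · simp only [pvInsU_multistagebuild, pvInsU_distrolessfinal, pvInsU_layercachingoptimized,
      pvMkD_items]
    unfold pvHitApt pvHitApk pvHitYum pvHitPip pvHitNpm pvHitYarn pvHitMvn pvHitGradle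
      pvHitHealth pvIsRun pvRunArgs pvArgA pvArgB
    simp_all [pvPkgFilesA, pvPkgFilesB, pvArgA]

-- ===== VERDICT (by name: the statement is the Claim_ definition above) =====
theorem detect_patterns_py_spec : Claim_equal_detect_patterns_py := by
  intro instructions _ _
  unfold Spec_detect_patterns_py
  exact pvMain instructions
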